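-- pv_equiv track=rewrite | github.com/LogCentral-io/simple-log-analyzer | log_analyzer/parsers/unifi.py | _categorize_process
-- ===== SOURCE A (Python) =====
-- def _categorize_process(process: str) -> str:
--     """Categorize process into broader categories."""
--     process_lower = process.lower()
--
--     if process_lower == "unifi-security":
--         return "unifi-security"
--     elif "systemd" in process_lower:
--         return "system"
--     elif any(x in process_lower for x in ["kernel", "dmesg"]):
--         return "kernel"
--     elif any(x in process_lower for x in ["mcad", "stamgr", "wevent", "ubios"]):
--         return "unifi-controller"
--     elif any(x in process_lower for x in ["hostapd", "wpa"]):
--         return "wifi"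
--     elif any(x in process_lower for x in ["dhcp", "dns", "named"]):
--         return "network-services"
--     elif any(x in process_lower for x in ["ssh", "sshd", "login"]):
--         return "auth"
--     else:
--         return "other"
-- ===== SOURCE B (Python) =====
-- _KEYWORDS = {
--     "systemd": (1, "system"),
--     "kernel": (2, "kernel"), "dmesg": (2, "kernel"),
--     "mcad": (3, "unifi-controller"), "stamgr": (3, "unifi-controller"),
--     "wevent": (3, "unifi-controller"), "ubios": (3, "unifi-controller"),
--     "hostapd": (4, "wifi"), "wpa": (4, "wifi"),
--     "dhcp": (5, "network-services"), "dns": (5, "network-services"),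
--     "named": (5, "network-services"),
--     "ssh": (6, "auth"), "sshd": (6, "auth"), "login": (6, "auth"),
-- }
--
--
-- def _categorize_process(process: str) -> str:
--     """Categorize process into broader categories."""
--     p = process.lower()
--     if p == "unifi-security":
--         return "unifi-security"
--     best = None
--     for kw, (rank, cat) in _KEYWORDS.items():
--         if kw in p and (best is None or rank < best[0]):
--             best = (rank, cat)
--     return best[1] if best is not None else "other"
-- ===== Notes on version B (the rewrite author's own statement) =====
-- stated objective: alternative
-- what changed: Instead of an ordered short-circuiting if-elif chain, B scans a flat keyword->(priority,category) map once, keeping the minimum-priority hit in an accumulator, and returns that hit's category (equality-test for 'unifi-security' kept up front).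
import Mathlib
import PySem

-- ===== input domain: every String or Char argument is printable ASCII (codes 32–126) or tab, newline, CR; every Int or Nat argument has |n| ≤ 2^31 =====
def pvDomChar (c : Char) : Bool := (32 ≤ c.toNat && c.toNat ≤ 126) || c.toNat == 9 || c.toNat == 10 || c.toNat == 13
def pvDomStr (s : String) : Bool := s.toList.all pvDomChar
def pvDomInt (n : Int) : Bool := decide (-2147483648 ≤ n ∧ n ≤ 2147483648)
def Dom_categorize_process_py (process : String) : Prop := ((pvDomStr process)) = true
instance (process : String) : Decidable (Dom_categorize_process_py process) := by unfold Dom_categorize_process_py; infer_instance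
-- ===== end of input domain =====

-- B replaces A's ordered if-elif chain by a single min-priority scan over a flat keyword map (alternative; same cost).
-- ===== PORT A =====
def categorize_process_py (process : String) : String :=
  let process_lower := PySem.Str.lower process
  if process_lower == "unifi-security" then "unifi-security"
  else if PySem.Str.isIn "systemd" process_lower then "system"
  else if ["kernel", "dmesg"].any (fun x => PySem.Str.isIn x process_lower) then "kernel"
  else if ["mcad", "stamgr", "wevent", "ubios"].any (fun x => PySem.Str.isIn x process_lower) then "unifi-controller"
  else if ["hostapd", "wpa"].any (fun x => PySem.Str.isIn x process_lower) then "wifi"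
  else if ["dhcp", "dns", "named"].any (fun x => PySem.Str.isIn x process_lower) then "network-services"
  else if ["ssh", "sshd", "login"].any (fun x => PySem.Str.isIn x process_lower) then "auth"
  else "other"

-- ===== PORT B =====
def pvKeywords : List (String × Nat × String) :=
  [ ("systemd", 1, "system"),
    ("kernel", 2, "kernel"), ("dmesg", 2, "kernel"),
    ("mcad", 3, "unifi-controller"), ("stamgr", 3, "unifi-controller"),
    ("wevent", 3, "unifi-controller"), ("ubios", 3, "unifi-controller"),
    ("hostapd", 4, "wifi"), ("wpa", 4, "wifi"),
    ("dhcp", 5, "network-services"), ("dns", 5, "network-services"),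
    ("named", 5, "network-services"),
    ("ssh", 6, "auth"), ("sshd", 6, "auth"), ("login", 6, "auth") ]

-- one loop step of B: keep the best (minimum-priority) keyword hit seen so far
def pvStep (p : String) (best : Option (Nat × String)) (k : String × Nat × String) : Option (Nat × String) :=
  if PySem.Str.isIn k.1 p && (match best with | none => true | some b => decide (k.2.1 < b.1))
  then some (k.2.1, k.2.2) else best

def categorize_process_py_alt (process : String) : String :=
  let p := PySem.Str.lower process
  if p == "unifi-security" then "unifi-security"
  else
    match pvKeywords.foldl (pvStep p) none with
    | some b => b.2
    | none => "other"

-- ===== PRECONDITION & SPEC =====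
def Spec_categorize_process_py (process : String) (out : String) : Prop := out = categorize_process_py_alt process
instance (process : String) (out : String) : Decidable (Spec_categorize_process_py process out) := by unfold Spec_categorize_process_py; infer_instance

-- ===== CLAIM =====
def Claim_equal_categorize_process_py : Prop := ∀ (process : String), Dom_categorize_process_py process → Spec_categorize_process_py process (categorize_process_py process)

-- ===== LEMMAS AND PROOFS =====

-- once a hit of priority r is held, keywords of priority ≥ r never replace it
theorem pv_absorb (p : String) (l : List (String × Nat × String)) (r : Nat) (c : String)
    (h : ∀ k ∈ l, r ≤ k.2.1) : l.foldl (pvStep p) (some (r, c)) = some (r, c) := by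
  induction l with
  | nil => rfl
  | cons k l ih =>
    have hk : r ≤ k.2.1 := h k (by simp)
    have : pvStep p (some (r, c)) k = some (r, c) := by
      simp [pvStep, Nat.not_lt.mpr hk]
    simp only [List.foldl, this]
    exact ih (fun k hk => h k (by simp [hk]))

-- folding a homogeneous group (all priority r, category c) from an empty accumulator
theorem pv_group (p : String) (l : List (String × Nat × String)) (r : Nat) (c : String)
    (h : ∀ k ∈ l, k.2 = (r, c)) :
    l.foldl (pvStep p) none
      = if l.any (fun k => PySem.Str.isIn k.1 p) then some (r, c) else none := by
  induction l with
  | nil => rfl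
  | cons k l ih =>
    have hk : k.2 = (r, c) := h k (by simp)
    cases hm : PySem.Chars.isIn k.1.toList p.toList with
    | true =>
      have : pvStep p none k = some (r, c) := by simp [pvStep, PySem.Str.isIn, hm, hk]
      simp only [List.foldl, this]
      rw [pv_absorb p l r c (fun k hk' => by simp [h k (by simp [hk'])])]
      simp only [List.any_cons, PySem.Str.isIn, hm, Bool.true_or, if_pos]
    | false =>
      have : pvStep p none k = none := by simp [pvStep, PySem.Str.isIn, hm]
      simp only [List.foldl, this]
      rw [ih (fun k hk' => h k (by simp [hk']))]
      simp only [List.any_cons, PySem.Str.isIn, hm, Bool.false_or]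
      rfl

-- peel one homogeneous group off the front of the keyword list
theorem pv_split (p : String) (g rest : List (String × Nat × String)) (r : Nat) (c : String)
    (hg : ∀ k ∈ g, k.2 = (r, c)) (hrest : ∀ k ∈ rest, r ≤ k.2.1) :
    (g ++ rest).foldl (pvStep p) none
      = if g.any (fun k => PySem.Str.isIn k.1 p) then some (r, c)
        else rest.foldl (pvStep p) none := by
  rw [List.foldl_append, pv_group p g r c hg]
  split_ifs with h
  · exact pv_absorb p rest r c hrest
  · rfl

-- the whole fold, characterised as A's chain of group tests
theorem pv_fold_full (p : String) :
    pvKeywords.foldl (pvStep p) none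
      = if PySem.Str.isIn "systemd" p then some (1, "system")
        else if ["kernel", "dmesg"].any (fun x => PySem.Str.isIn x p) then some (2, "kernel")
        else if ["mcad", "stamgr", "wevent", "ubios"].any (fun x => PySem.Str.isIn x p) then some (3, "unifi-controller")
        else if ["hostapd", "wpa"].any (fun x => PySem.Str.isIn x p) then some (4, "wifi")
        else if ["dhcp", "dns", "named"].any (fun x => PySem.Str.isIn x p) then some (5, "network-services")
        else if ["ssh", "sshd", "login"].any (fun x => PySem.Str.isIn x p) then some (6, "auth")
        else none := by
  have e : pvKeywords
      = [("systemd", (1 : Nat), "system")]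
        ++ ([("kernel", 2, "kernel"), ("dmesg", 2, "kernel")]
        ++ ([("mcad", 3, "unifi-controller"), ("stamgr", 3, "unifi-controller"),
             ("wevent", 3, "unifi-controller"), ("ubios", 3, "unifi-controller")]
        ++ ([("hostapd", 4, "wifi"), ("wpa", 4, "wifi")]
        ++ ([("dhcp", 5, "network-services"), ("dns", 5, "network-services"),
             ("named", 5, "network-services")]
        ++ [("ssh", 6, "auth"), ("sshd", 6, "auth"), ("login", 6, "auth")])))) := by rfl
  rw [e]
  rw [pv_split p _ _ 1 "system" (by decide) (by decide)]
  rw [pv_split p _ _ 2 "kernel" (by decide) (by decide)]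
  rw [pv_split p _ _ 3 "unifi-controller" (by decide) (by decide)]
  rw [pv_split p _ _ 4 "wifi" (by decide) (by decide)]
  rw [pv_split p _ _ 5 "network-services" (by decide) (by decide)]
  rw [pv_group p _ 6 "auth" (by decide)]
  simp [List.any]

-- ===== VERDICT =====
theorem categorize_process_py_spec : Claim_equal_categorize_process_py := by
  intro process _
  unfold Spec_categorize_process_py categorize_process_py categorize_process_py_alt
  set pl := PySem.Str.lower process with hpl
  by_cases h1 : pl == "unifi-security"
  · simp [h1]
  · simp only [h1, Bool.false_eq_true, if_false, pv_fold_full pl]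
    split_ifs <;> rfl
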